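-- pv_equiv track=rewrite | github.com/niteeshaiml1/Python_Programs | revision/sum_prime_dig.py | sum_prime_dig
-- ===== SOURCE A (Python) =====
-- def sum_prime_dig(num):
--     sum_prime=0
--     temp=num
--     while temp>0:
--         dig=temp%10
--         temp=temp//10
--         if dig<2:
--             continue
--         for i in range (2,dig):
--             if dig%i==0:
--                 break
--         else:
--             sum_prime+=dig
--     return sum_prime
-- ===== SOURCE B (Python) =====
-- def sum_prime_dig(num):
--     digits = []
--     temp = num
--     while temp > 0:
--         digits.append(temp % 10)
--         temp //= 10
--     return sum(d for d in digits if d in (2, 3, 5, 7))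
-- ===== Notes on version B (the rewrite author's own statement) =====
-- stated objective: simpler
-- what changed: B splits the fused loop into two passes: one arithmetic pass collecting the digits into a list, then a sum over the digits that are members of the fixed set (2,3,5,7), eliminating A's inner trial-division loop with for/else break logic.
import Mathlib
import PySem

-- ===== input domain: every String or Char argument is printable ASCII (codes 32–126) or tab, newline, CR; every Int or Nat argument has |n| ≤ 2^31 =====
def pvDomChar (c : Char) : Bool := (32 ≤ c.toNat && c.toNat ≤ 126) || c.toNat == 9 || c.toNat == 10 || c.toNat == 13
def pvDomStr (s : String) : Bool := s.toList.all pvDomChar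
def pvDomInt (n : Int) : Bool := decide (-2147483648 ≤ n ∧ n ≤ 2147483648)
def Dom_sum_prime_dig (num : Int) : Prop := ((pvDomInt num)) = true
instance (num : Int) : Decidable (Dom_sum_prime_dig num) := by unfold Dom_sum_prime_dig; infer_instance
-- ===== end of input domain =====

-- B replaces A's fused loop (inner trial-division for/else per digit) by two passes:
-- collect the digits arithmetically, then sum those in the fixed set (2,3,5,7).


-- ===== PORT A =====
-- A's while loop; `fuel` is only a totality guard (fuel = temp.toNat suffices, as temp//10 shrinks toNat)
def sumPrimeDigLoopA (fuel : Nat) (temp sum_prime : Int) : Int :=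
  match fuel with
  | 0 => sum_prime
  | fuel + 1 =>
    if temp > 0 then
      let dig := PySem.Int.mod temp 10
      let temp2 := PySem.Int.floordiv temp 10
      if dig < 2 then
        sumPrimeDigLoopA fuel temp2 sum_prime
      else if (PySem.List.pyRange 2 dig 1).any (fun i => PySem.Int.mod dig i == 0) then
        sumPrimeDigLoopA fuel temp2 sum_prime
      else
        sumPrimeDigLoopA fuel temp2 (sum_prime + dig)
    else sum_prime

def sum_prime_dig (num : Int) : Int := sumPrimeDigLoopA num.toNat num 0

-- ===== PORT B =====
-- B's first pass: collect the digits (same fuel guard)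
def digitsLoopB (fuel : Nat) (temp : Int) (acc : List Int) : List Int :=
  match fuel with
  | 0 => acc
  | fuel + 1 =>
    if temp > 0 then
      digitsLoopB fuel (PySem.Int.floordiv temp 10) (acc ++ [PySem.Int.mod temp 10])
    else acc

def sum_prime_dig_alt (num : Int) : Int :=
  ((digitsLoopB num.toNat num []).filter (fun d => d == 2 || d == 3 || d == 5 || d == 7)).sum

-- ===== PRECONDITION & SPEC =====
def Spec_sum_prime_dig (num : Int) (out : Int) : Prop := out = sum_prime_dig_alt num
instance (num : Int) (out : Int) : Decidable (Spec_sum_prime_dig num out) := by unfold Spec_sum_prime_dig; infer_instance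

-- ===== CLAIM (what is proved, stated in full; the proofs are below) =====
def Claim_equal_sum_prime_dig : Prop := ∀ (num : Int), Dom_sum_prime_dig num → Spec_sum_prime_dig num (sum_prime_dig num)

-- ===== LEMMAS AND PROOFS =====

-- digitsLoopB with any accumulator = accumulator ++ digitsLoopB with []
lemma digitsLoopB_acc (fuel : Nat) : ∀ (temp : Int) (acc : List Int),
    digitsLoopB fuel temp acc = acc ++ digitsLoopB fuel temp [] := by
  induction fuel with
  | zero => intro temp acc; simp [digitsLoopB]
  | succ fuel ih =>
      intro temp acc
      by_cases h : temp > 0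
      · simp only [digitsLoopB, if_pos h]
        rw [ih (PySem.Int.floordiv temp 10) (acc ++ [PySem.Int.mod temp 10]),
            ih (PySem.Int.floordiv temp 10) ([] ++ [PySem.Int.mod temp 10])]
        simp
      · simp [digitsLoopB, h]

-- the per-digit condition of A equals membership in {2,3,5,7}, for 0 ≤ dig < 10
lemma digit_cond (dig : Int) (h0 : 0 ≤ dig) (h9 : dig < 10) :
    (if dig < 2 then (0:Int)
     else if (PySem.List.pyRange 2 dig 1).any (fun i => PySem.Int.mod dig i == 0) then 0
     else dig)
    = (if (dig == 2 || dig == 3 || dig == 5 || dig == 7) then dig else 0) := by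
  interval_cases dig <;> decide

-- main invariant: A's loop = accumulator + B's filtered sum of the digit list
lemma loop_eq (fuel : Nat) : ∀ (temp acc : Int),
    sumPrimeDigLoopA fuel temp acc
      = acc + ((digitsLoopB fuel temp []).filter
          (fun d => d == 2 || d == 3 || d == 5 || d == 7)).sum := by
  induction fuel with
  | zero => intro temp acc; simp [sumPrimeDigLoopA, digitsLoopB]
  | succ fuel ih =>
      intro t acc
      by_cases h : t > 0
      · have hm := PySem.Int.mod_eq_emod_of_pos (a := t) (b := 10) (by omega)
        have hd0 : 0 ≤ PySem.Int.mod t 10 := by rw [hm]; omega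
        have hd9 : PySem.Int.mod t 10 < 10 := by rw [hm]; omega
        have hcond := digit_cond (PySem.Int.mod t 10) hd0 hd9
        simp only [sumPrimeDigLoopA, digitsLoopB, if_pos h]
        rw [digitsLoopB_acc]
        split_ifs with h1 h2
        · rw [ih]
          simp only [if_pos h1] at hcond
          simp only [List.filter_append, List.filter_cons, List.filter_nil,
            List.sum_append, List.nil_append]
          split_ifs at hcond ⊢ with hp <;>
            (try simp only [List.sum_cons, List.sum_nil]) <;> omega
        · rw [ih]
          simp only [if_neg h1, if_pos h2] at hcond
          simp only [List.filter_append, List.filter_cons, List.filter_nil,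
            List.sum_append, List.nil_append]
          split_ifs at hcond ⊢ with hp <;>
            (try simp only [List.sum_cons, List.sum_nil]) <;> omega
        · rw [ih]
          simp only [if_neg h1, if_neg h2] at hcond
          simp only [List.filter_append, List.filter_cons, List.filter_nil,
            List.sum_append, List.nil_append]
          split_ifs at hcond ⊢ with hp <;>
            (try simp only [List.sum_cons, List.sum_nil]) <;> omega
      · simp [sumPrimeDigLoopA, digitsLoopB, h]

-- ===== VERDICT (by name: the statement is the Claim_ definition above) =====
theorem sum_prime_dig_spec : Claim_equal_sum_prime_dig := by
  intro num _
  show sum_prime_dig num = sum_prime_dig_alt num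
  rw [sum_prime_dig, sum_prime_dig_alt, loop_eq]
  omega
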